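-- pv_equiv track=rewrite | github.com/mayurk07/MakStox | test_autorefresh_logic.py | get_next_update_time
-- ===== SOURCE A (Python) =====
-- def get_next_update_time(current_minutes, current_seconds):
--     """Calculate next update time at :01, :16, :31, or :46 minutes"""
--     # Target minutes: 1, 16, 31, 46
--     target_minutes = [1, 16, 31, 46]
--
--     # Find the next target minute
--     next_minute = None
--     for m in target_minutes:
--         if m > current_minutes:
--             next_minute = m
--             break
--
--     # If no target found in current hour, use first target of next hour
--     if next_minute is None:
--         next_minute = target_minutes[0] + 60  # Add 60 to move to next hour
--
--     # Calculate milliseconds to next target time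
--     minutes_to_next = next_minute - current_minutes
--     ms_to_next = (minutes_to_next * 60 - current_seconds) * 1000
--
--     return ms_to_next, minutes_to_next
-- ===== SOURCE B (Python) =====
-- def get_next_update_time(current_minutes, current_seconds):
--     """Calculate next update time at :01, :16, :31, or :46 minutes (closed form)"""
--     k = (current_minutes - 1) // 15 + 1
--     next_minute = 1 + 15 * min(max(k, 0), 4)
--     minutes_to_next = next_minute - current_minutes
--     ms_to_next = (minutes_to_next * 60 - current_seconds) * 1000
--     return ms_to_next, minutes_to_next
-- ===== Notes on version B (the rewrite author's own statement) =====
-- stated objective: simpler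
-- what changed: Replaces the scan over the target-minute list (and the None fallback) with a closed-form computation of the next target minute via floor division clamped to [0,4].
import Mathlib
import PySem

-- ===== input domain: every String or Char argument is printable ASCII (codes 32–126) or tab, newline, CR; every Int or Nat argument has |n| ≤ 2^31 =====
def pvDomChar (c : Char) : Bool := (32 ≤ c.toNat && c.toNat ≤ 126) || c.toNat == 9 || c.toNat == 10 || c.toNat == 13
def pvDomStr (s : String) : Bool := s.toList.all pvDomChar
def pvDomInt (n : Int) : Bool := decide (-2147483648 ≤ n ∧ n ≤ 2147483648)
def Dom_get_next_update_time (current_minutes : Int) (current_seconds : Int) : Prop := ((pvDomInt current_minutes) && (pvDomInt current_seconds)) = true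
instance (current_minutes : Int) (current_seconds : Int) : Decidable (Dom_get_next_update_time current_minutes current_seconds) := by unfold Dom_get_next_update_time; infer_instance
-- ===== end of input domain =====

-- B replaces A's scan over the target-minute list (with None fallback) by a
-- closed-form next-minute computation via floor division clamped to [0,4]; objective: simpler.

-- ===== PORT A =====
-- the for-loop with break over target_minutes, resolving next_minute (None -> 61)
def get_next_update_time (current_minutes : Int) (current_seconds : Int) : Int × Int :=
  let target_minutes : List Int := [1, 16, 31, 46]
  let next_minute_opt : Option Int := List.find? (fun m => m > current_minutes) target_minutes
  let next_minute : Int :=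
    match next_minute_opt with
    | none => target_minutes[0]! + 60
    | some m => m
  let minutes_to_next := next_minute - current_minutes
  let ms_to_next := (minutes_to_next * 60 - current_seconds) * 1000
  (ms_to_next, minutes_to_next)

-- ===== PORT B =====
def get_next_update_time_alt (current_minutes : Int) (current_seconds : Int) : Int × Int :=
  let k := PySem.Int.floordiv (current_minutes - 1) 15 + 1
  let next_minute := 1 + 15 * min (max k 0) 4
  let minutes_to_next := next_minute - current_minutes
  let ms_to_next := (minutes_to_next * 60 - current_seconds) * 1000
  (ms_to_next, minutes_to_next)

-- ===== PRECONDITION & SPEC =====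
def Spec_get_next_update_time (current_minutes : Int) (current_seconds : Int) (out : Int × Int) : Prop := out = get_next_update_time_alt current_minutes current_seconds
instance (current_minutes : Int) (current_seconds : Int) (out : Int × Int) : Decidable (Spec_get_next_update_time current_minutes current_seconds out) := by unfold Spec_get_next_update_time; infer_instance

-- ===== CLAIM (what is proved, stated in full; the proofs are below) =====
def Claim_equal_get_next_update_time : Prop := ∀ (current_minutes : Int) (current_seconds : Int), Dom_get_next_update_time current_minutes current_seconds → Spec_get_next_update_time current_minutes current_seconds (get_next_update_time current_minutes current_seconds)

-- ===== LEMMAS AND PROOFS =====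

-- The two next-minute computations coincide for every Int.
theorem next_minute_eq (cm : Int) :
    (match List.find? (fun m => m > cm) ([1, 16, 31, 46] : List Int) with
      | none => (([1, 16, 31, 46] : List Int)[0]! + 60)
      | some m => m)
    = 1 + 15 * min (max (PySem.Int.floordiv (cm - 1) 15 + 1) 0) 4 := by
  have hdm := PySem.Int.floordiv_mul_add_mod (cm - 1) 15
  have hm0 := PySem.Int.mod_nonneg (cm - 1) (b := 15) (by norm_num)
  have hm1 := PySem.Int.mod_lt (cm - 1) (b := 15) (by norm_num)
  simp only [List.find?]
  by_cases h1 : (1 : Int) > cm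
  · simp only [h1, decide_true]
    omega
  · by_cases h2 : (16 : Int) > cm
    · simp [h1, h2]; omega
    · by_cases h3 : (31 : Int) > cm
      · simp [h1, h2, h3]; omega
      · by_cases h4 : (46 : Int) > cm
        · simp [h1, h2, h3, h4]; omega
        · simp [h1, h2, h3, h4]; omega

-- ===== VERDICT (by name: the statement is the Claim_ definition above) =====
theorem get_next_update_time_spec : Claim_equal_get_next_update_time := by
  intro cm cs _
  unfold Spec_get_next_update_time get_next_update_time get_next_update_time_alt
  simp only [next_minute_eq cm]
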